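-- pv_equiv track=rewrite | github.com/Xnhyacinth/ResAdapt | resadapt/eval/offline_trans.py | _expand_video_prompt_blocks
-- ===== SOURCE A (Python) =====
-- def _expand_video_prompt_blocks(prompt: str, video_inputs) -> str:
--     video_block = "<|vision_start|><|video_pad|><|vision_end|>"
--     parts = prompt.split(video_block)
--     if len(parts) - 1 != len(video_inputs):
--         raise ValueError(
--             f"The prompt contains {len(parts)-1} video placeholders, but {len(video_inputs)} video inputs are provided."
--         )
--     new_prompt = parts[0]
--     for i, video in enumerate(video_inputs):
--         count_n = len(video) if isinstance(video, list) else 1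
--         new_prompt += (video_block * count_n) + parts[i + 1]
--     return new_prompt
-- ===== SOURCE B (Python) =====
-- def _expand_video_prompt_blocks(prompt: str, video_inputs) -> str:
--     video_block = "<|vision_start|><|video_pad|><|vision_end|>"
--     found = prompt.count(video_block)
--     if found != len(video_inputs):
--         raise ValueError(
--             f"The prompt contains {found} video placeholders, but {len(video_inputs)} video inputs are provided."
--         )
--     chunks = []
--     i = 0
--     k = 0
--     while i < len(prompt):
--         if prompt.startswith(video_block, i):
--             video = video_inputs[k]
--             count_n = len(video) if isinstance(video, list) else 1
--             chunks.append(video_block * count_n)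
--             k += 1
--             i += len(video_block)
--         else:
--             chunks.append(prompt[i])
--             i += 1
--     return "".join(chunks)
-- ===== Notes on version B (the rewrite author's own statement) =====
-- stated objective: alternative
-- what changed: B validates by counting occurrences up front and then expands the placeholders in one left-to-right scan of the prompt (startswith at each position, emitting chunks), instead of A's split-into-parts followed by reassembly via indexed parts[i+1].
import Mathlib
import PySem

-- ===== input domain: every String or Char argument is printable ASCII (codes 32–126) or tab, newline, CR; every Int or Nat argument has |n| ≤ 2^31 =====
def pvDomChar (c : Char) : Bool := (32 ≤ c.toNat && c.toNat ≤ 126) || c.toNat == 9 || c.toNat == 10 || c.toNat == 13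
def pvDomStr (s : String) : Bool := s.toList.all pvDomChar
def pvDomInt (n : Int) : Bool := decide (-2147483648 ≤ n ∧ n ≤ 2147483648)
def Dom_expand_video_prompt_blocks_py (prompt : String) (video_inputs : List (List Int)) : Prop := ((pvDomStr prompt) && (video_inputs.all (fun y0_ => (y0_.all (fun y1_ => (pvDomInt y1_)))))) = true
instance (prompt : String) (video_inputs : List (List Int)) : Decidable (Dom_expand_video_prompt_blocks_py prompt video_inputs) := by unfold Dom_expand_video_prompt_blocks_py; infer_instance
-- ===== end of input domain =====

-- B replaces A's split-and-reassemble (parts indexed by i+1) by an up-front occurrence count plus a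
-- single left-to-right scan that expands each placeholder in place; same cost, different algorithm.

-- ===== PORT A =====
-- literal port of A: split the prompt on the marker, check the part count, rebuild by indexed parts.
-- count_n = len(video) if isinstance(video, list) else 1: under the type List (List Int) every
-- element is a list, so count_n is video.length.
def expand_video_prompt_blocks_py (prompt : String) (video_inputs : List (List Int)) : String :=
  let video_block : List Char := "<|vision_start|><|video_pad|><|vision_end|>".toList
  let parts : List (List Char) := (PySem.Chars.split? prompt.toList video_block).getD []
  if ((parts.length : Int) - 1) ≠ (video_inputs.length : Int) then
    ""  -- Python raises ValueError here; excluded by Pre_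
  else
    String.ofList <|
      (PySem.List.enumerate video_inputs).foldl
        (fun new_prompt iv =>
          new_prompt ++ PySem.List.pyRepeat video_block ((iv.2.length : Int))
            ++ (PySem.List.pyGet? parts (iv.1 + 1)).getD [])
        ((PySem.List.pyGet? parts 0).getD [])

-- ===== PORT B =====
def pvVideoBlock : List Char := "<|vision_start|><|video_pad|><|vision_end|>".toList

-- the while loop of B: scan the prompt, expanding each marker occurrence from the front of
-- video_inputs (count_n's isinstance branch likewise collapses to video.length under this type)
def pvScanChunks (video_inputs : List (List Int)) (l : List Char) : List Char :=
  match l with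
  | [] => []
  | c :: rest =>
    if pvVideoBlock.isPrefixOf (c :: rest) then
      match video_inputs with
      | [] => []  -- unreachable under Pre_: the up-front count check matched
      | video :: vs =>
        PySem.List.pyRepeat pvVideoBlock ((video.length : Int)) ++
          pvScanChunks vs ((c :: rest).drop pvVideoBlock.length)
    else c :: pvScanChunks video_inputs rest
termination_by l.length
decreasing_by
· have h : 0 < pvVideoBlock.length := by decide
  simp only [List.length_drop, List.length_cons]
  omega
· simp

def expand_video_prompt_blocks_py_alt (prompt : String) (video_inputs : List (List Int)) : String :=
  let found := PySem.Chars.count prompt.toList pvVideoBlock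
  if ((found : Int)) ≠ (video_inputs.length : Int) then
    ""  -- Python raises ValueError here; excluded by Pre_
  else
    String.ofList (pvScanChunks video_inputs prompt.toList)

-- ===== PRECONDITION & SPEC =====
-- Pre_ excludes the inputs on which A raises ValueError: the number of marker occurrences in the
-- prompt differs from the number of video inputs.
def Pre_expand_video_prompt_blocks_py (prompt : String) (video_inputs : List (List Int)) : Prop :=
  PySem.Str.count prompt "<|vision_start|><|video_pad|><|vision_end|>" = video_inputs.length
instance (prompt : String) (video_inputs : List (List Int)) : Decidable (Pre_expand_video_prompt_blocks_py prompt video_inputs) := by unfold Pre_expand_video_prompt_blocks_py; infer_instance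

def pvWitness_expand_video_prompt_blocks_py : String × List (List Int) :=
  ("a<|vision_start|><|video_pad|><|vision_end|>b", [[1, 2]])

def Spec_expand_video_prompt_blocks_py (prompt : String) (video_inputs : List (List Int)) (out : String) : Prop := out = expand_video_prompt_blocks_py_alt prompt video_inputs
instance (prompt : String) (video_inputs : List (List Int)) (out : String) : Decidable (Spec_expand_video_prompt_blocks_py prompt video_inputs out) := by unfold Spec_expand_video_prompt_blocks_py; infer_instance

-- ===== CLAIM (what is proved, stated in full; the proofs are below) =====
def Claim_equal_expand_video_prompt_blocks_py : Prop := ∀ (prompt : String) (video_inputs : List (List Int)), Dom_expand_video_prompt_blocks_py prompt video_inputs → Pre_expand_video_prompt_blocks_py prompt video_inputs → Spec_expand_video_prompt_blocks_py prompt video_inputs (expand_video_prompt_blocks_py prompt video_inputs)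

-- ===== LEMMAS AND PROOFS =====

-- reference splitter: Python's split on the (non-empty) marker, as a plain recursion
def pvSplitRec (l : List Char) : List (List Char) :=
  match l with
  | [] => [[]]
  | c :: rest =>
    if pvVideoBlock.isPrefixOf (c :: rest) then
      [] :: pvSplitRec ((c :: rest).drop pvVideoBlock.length)
    else (pvSplitRec rest).modifyHead (c :: ·)
termination_by l.length
decreasing_by
· have h : 0 < pvVideoBlock.length := by decide
  simp only [List.length_drop, List.length_cons]
  omega
· simp

-- the common value: head part, then alternately the expanded block and the next part
def pvZrep (videos : List (List Int)) (parts : List (List Char)) : List Char :=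
  match videos, parts with
  | [], _ => []
  | _ :: _, [] => []
  | v :: vs, p :: ps => PySem.List.pyRepeat pvVideoBlock ((v.length : Int)) ++ p ++ pvZrep vs ps

theorem pvSplitRec_ne_nil (l : List Char) : pvSplitRec l ≠ [] := by
  fun_induction pvSplitRec l with
  | case1 => simp
  | case2 => simp
  | case3 c rest h ih =>
    cases hq : pvSplitRec rest with
    | nil => exact absurd hq ih
    | cons p ps => simp

theorem pvSplitOn_go_spec (fuel : Nat) :
    ∀ (l cur : List Char) (acc : List (List Char)), l.length < fuel →
    PySem.Chars.splitOn.go pvVideoBlock fuel l cur acc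
      = acc.reverse ++ (pvSplitRec l).modifyHead (cur.reverse ++ ·) := by
  induction fuel with
  | zero => intro l cur acc h; omega
  | succ f ih =>
    intro l cur acc h
    cases l with
    | nil =>
      simp [PySem.Chars.splitOn.go, pvSplitRec]
    | cons c rest =>
      by_cases hp : pvVideoBlock.isPrefixOf (c :: rest) = true
      · rw [show PySem.Chars.splitOn.go pvVideoBlock (f + 1) (c :: rest) cur acc
            = PySem.Chars.splitOn.go pvVideoBlock f (List.drop pvVideoBlock.length (c :: rest)) []
                (cur.reverse :: acc) by simp [PySem.Chars.splitOn.go, hp]]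
        have hlen : (List.drop pvVideoBlock.length (c :: rest)).length < f := by
          simp only [List.length_drop, List.length_cons] at *
          have : 0 < pvVideoBlock.length := by decide
          omega
        rw [ih _ _ _ hlen]
        simp only [pvSplitRec]
        rw [if_pos hp]
        cases hq : pvSplitRec (List.drop pvVideoBlock.length (c :: rest)) with
        | nil => exact absurd hq (pvSplitRec_ne_nil _)
        | cons p ps => simp
      · rw [show PySem.Chars.splitOn.go pvVideoBlock (f + 1) (c :: rest) cur acc
            = PySem.Chars.splitOn.go pvVideoBlock f rest (c :: cur) acc by
              simp [PySem.Chars.splitOn.go, hp]]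
        have hlen : rest.length < f := by simp only [List.length_cons] at h; omega
        rw [ih _ _ _ hlen]
        simp only [pvSplitRec]
        rw [if_neg hp]
        cases hq : pvSplitRec rest with
        | nil => exact absurd hq (pvSplitRec_ne_nil _)
        | cons p ps => simp

theorem pvSplitOn_eq (l : List Char) : PySem.Chars.splitOn l pvVideoBlock = pvSplitRec l := by
  rw [PySem.Chars.splitOn, pvSplitOn_go_spec (l.length + 1) l [] [] (by omega)]
  cases hq : pvSplitRec l with
  | nil => exact absurd hq (pvSplitRec_ne_nil _)
  | cons p ps => simp

theorem pvCount_go_spec (fuel : Nat) :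
    ∀ (l : List Char) (acc : Nat), l.length ≤ fuel →
    PySem.Chars.count.go pvVideoBlock fuel l acc = acc + ((pvSplitRec l).length - 1) := by
  induction fuel with
  | zero =>
    intro l acc h
    have : l = [] := List.length_eq_zero_iff.mp (by omega)
    subst this
    simp [PySem.Chars.count.go, pvSplitRec]
  | succ f ih =>
    intro l acc h
    cases l with
    | nil => simp [PySem.Chars.count.go, pvSplitRec]
    | cons c rest =>
      by_cases hp : pvVideoBlock.isPrefixOf (c :: rest) = true
      · rw [show PySem.Chars.count.go pvVideoBlock (f + 1) (c :: rest) acc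
            = PySem.Chars.count.go pvVideoBlock f (List.drop pvVideoBlock.length (c :: rest)) (acc + 1) by
              simp [PySem.Chars.count.go, hp]]
        have hlen : (List.drop pvVideoBlock.length (c :: rest)).length ≤ f := by
          simp only [List.length_drop, List.length_cons] at *
          have : 0 < pvVideoBlock.length := by decide
          omega
        rw [ih _ _ hlen]
        simp only [pvSplitRec]
        rw [if_pos hp]
        have hpos : 0 < (pvSplitRec (List.drop pvVideoBlock.length (c :: rest))).length :=
          List.length_pos_iff.mpr (pvSplitRec_ne_nil _)
        simp only [List.length_cons]
        omega
      · rw [show PySem.Chars.count.go pvVideoBlock (f + 1) (c :: rest) acc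
            = PySem.Chars.count.go pvVideoBlock f rest acc by simp [PySem.Chars.count.go, hp]]
        have hlen : rest.length ≤ f := by simp only [List.length_cons] at h; omega
        rw [ih _ _ hlen]
        simp only [pvSplitRec]
        rw [if_neg hp]
        rw [List.length_modifyHead]

theorem pvCount_eq (l : List Char) :
    PySem.Chars.count l pvVideoBlock = (pvSplitRec l).length - 1 := by
  rw [PySem.Chars.count]
  rw [if_neg (by decide)]
  rw [pvCount_go_spec l.length l 0 (by omega)]
  omega

theorem pvScan_spec (videos : List (List Int)) (l : List Char)
    (h : (pvSplitRec l).length = videos.length + 1) :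
    pvScanChunks videos l = (pvSplitRec l).headD [] ++ pvZrep videos (pvSplitRec l).tail := by
  induction videos, l using pvScanChunks.induct with
  | case1 videos =>
    have hv : videos = [] := by
      simp only [pvSplitRec, List.length_cons, List.length_nil] at h
      exact List.length_eq_zero_iff.mp (by omega)
    subst hv
    rw [pvScanChunks.eq_def]
    simp [pvSplitRec, pvZrep]
  | case2 c rest hp =>
    rw [pvScanChunks.eq_def]
    simp only [pvSplitRec, if_pos hp]
    simp [pvZrep]
  | case3 c rest hp video vs ih =>
    have h' : (pvSplitRec (List.drop pvVideoBlock.length (c :: rest))).length = vs.length + 1 := by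
      simp only [pvSplitRec, if_pos hp, List.length_cons] at h
      omega
    rw [pvScanChunks.eq_def]
    simp only [if_pos hp]
    rw [ih h']
    simp only [pvSplitRec, if_pos hp]
    cases hq : pvSplitRec (List.drop pvVideoBlock.length (c :: rest)) with
    | nil => exact absurd hq (pvSplitRec_ne_nil _)
    | cons p ps => simp [pvZrep]
  | case4 videos c rest hp ih =>
    have h' : (pvSplitRec rest).length = videos.length + 1 := by
      simp only [pvSplitRec, if_neg hp, List.length_modifyHead] at h
      exact h
    rw [pvScanChunks.eq_def]
    simp only [if_neg hp]
    rw [ih h']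
    simp only [pvSplitRec, if_neg hp]
    cases hq : pvSplitRec rest with
    | nil => exact absurd hq (pvSplitRec_ne_nil _)
    | cons p ps => simp

theorem pvFoldA (videos : List (List Int)) (parts : List (List Char)) :
    ∀ (k : Nat) (np : List Char), k + videos.length + 1 ≤ parts.length →
    (PySem.List.enumerate videos (k : Int)).foldl
      (fun new_prompt iv =>
        new_prompt ++ PySem.List.pyRepeat pvVideoBlock ((iv.2.length : Int))
          ++ (PySem.List.pyGet? parts (iv.1 + 1)).getD []) np
      = np ++ pvZrep videos (parts.drop (k + 1)) := by
  induction videos with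
  | nil => intro k np _; simp [PySem.List.enumerate_nil, pvZrep]
  | cons v vs ih =>
    intro k np hk
    rw [PySem.List.enumerate_cons, List.foldl_cons]
    have hk1 : k + 1 < parts.length := by simp only [List.length_cons] at hk; omega
    have hget : (PySem.List.pyGet? parts ((k : Int) + 1)).getD [] = parts[k + 1] := by
      rw [show ((k : Int) + 1) = ((k + 1 : Nat) : Int) by push_cast; ring]
      rw [PySem.List.pyGet?_natCast]
      rw [List.getElem?_eq_getElem hk1]
      rfl
    rw [hget]
    rw [show ((k : Int) + 1) = ((k + 1 : Nat) : Int) by push_cast; ring]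
    rw [ih (k + 1) _ (by simp only [List.length_cons] at hk ⊢; omega)]
    rw [List.drop_eq_getElem_cons hk1]
    rw [pvZrep]
    simp [List.append_assoc]

-- ===== VERDICT (by name: the statement is the Claim_ definition above) =====
theorem expand_video_prompt_blocks_py_spec : Claim_equal_expand_video_prompt_blocks_py := by
  intro prompt videos _ hpre
  unfold Spec_expand_video_prompt_blocks_py
  unfold Pre_expand_video_prompt_blocks_py PySem.Str.count at hpre
  rw [show ("<|vision_start|><|video_pad|><|vision_end|>" : String).toList = pvVideoBlock from rfl] at hpre
  have hlen : (pvSplitRec prompt.toList).length = videos.length + 1 := by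
    have h1 := pvCount_eq prompt.toList
    have h2 : 0 < (pvSplitRec prompt.toList).length :=
      List.length_pos_iff.mpr (pvSplitRec_ne_nil _)
    omega
  unfold expand_video_prompt_blocks_py expand_video_prompt_blocks_py_alt
  rw [show ("<|vision_start|><|video_pad|><|vision_end|>" : String).toList = pvVideoBlock from rfl]
  dsimp only
  rw [show PySem.Chars.split? prompt.toList pvVideoBlock
      = some (PySem.Chars.splitOn prompt.toList pvVideoBlock) from by
        rw [PySem.Chars.split?, if_neg (by decide)]]
  rw [pvSplitOn_eq, Option.getD_some]
  rw [if_neg (by omega), if_neg (by omega)]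
  rw [pvScan_spec videos prompt.toList hlen]
  rw [show (0 : Int) = ((0 : Nat) : Int) from rfl, PySem.List.pyGet?_natCast]
  rw [pvFoldA videos (pvSplitRec prompt.toList) 0 _ (by omega)]
  rw [List.drop_one]
  cases hq : pvSplitRec prompt.toList with
  | nil => exact absurd hq (pvSplitRec_ne_nil _)
  | cons p ps => simp
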